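-- pv_equiv track=rewrite | github.com/Abdullah-hmed/sem-arithmetic | main.py | parse_parentheses
-- ===== SOURCE A (Python) =====
-- def parse_parentheses(tokens):
--     positive = []
--     negative = []
--     current_sign = '+'
--     i = 0
--
--     while i < len(tokens):
--         token = tokens[i]
--
--         if token == '+':
--             current_sign = '+'
--         elif token == '-':
--             current_sign = '-'
--         elif token == '(':
--             depth = 1
--             j = i + 1
--             while j < len(tokens) and depth > 0:
--                 if tokens[j] == '(':
--                     depth += 1
--                 elif tokens[j] == ')':
--                     depth -= 1
--                 j += 1
--
--             if depth != 0:
--                 raise ValueError("Mismatched parentheses")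
--
--             sub_tokens = tokens[i+1:j-1]
--             sub_pos, sub_neg = parse_parentheses(sub_tokens)
--
--             if current_sign == '+':
--                 positive.extend(sub_pos)
--                 negative.extend(sub_neg)
--             else:
--                 positive.extend(sub_neg)
--                 negative.extend(sub_pos)
--
--             i = j
--             continue
--         elif token == ')':
--             raise ValueError("Unexpected closing parenthesis")
--         else:
--             if current_sign == '+':
--                 positive.append(token.lower())
--             else:
--                 negative.append(token.lower())
--
--         i += 1
--
--     return positive, negative
-- ===== SOURCE B (Python) =====
-- def parse_parentheses(tokens):
--     # One pass with a stack of saved (base, sign) pairs; effective sign = base*sign.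
--     positive = []
--     negative = []
--     sign = '+'   # sign at the current nesting level
--     base = '+'   # product of the signs applied at each enclosing '('
--     stack = []
--     for token in tokens:
--         if token == '+':
--             sign = '+'
--         elif token == '-':
--             sign = '-'
--         elif token == '(':
--             stack.append((base, sign))
--             base = '+' if base == sign else '-'
--             sign = '+'
--         elif token == ')':
--             if not stack:
--                 raise ValueError("Unexpected closing parenthesis")
--             base, sign = stack.pop()
--         elif base == sign:
--             positive.append(token.lower())
--         else:
--             negative.append(token.lower())
--     if stack:
--         raise ValueError("Mismatched parentheses")
--     return positive, negative
-- ===== Notes on version B (the rewrite author's own statement) =====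
-- stated objective: faster
-- what changed: Replaced the recursive descent that rescans ahead for each matching ')' and recurses on list slices with a single left-to-right pass that keeps a stack of saved (base, sign) pairs, so each token is examined once.
import Mathlib
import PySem

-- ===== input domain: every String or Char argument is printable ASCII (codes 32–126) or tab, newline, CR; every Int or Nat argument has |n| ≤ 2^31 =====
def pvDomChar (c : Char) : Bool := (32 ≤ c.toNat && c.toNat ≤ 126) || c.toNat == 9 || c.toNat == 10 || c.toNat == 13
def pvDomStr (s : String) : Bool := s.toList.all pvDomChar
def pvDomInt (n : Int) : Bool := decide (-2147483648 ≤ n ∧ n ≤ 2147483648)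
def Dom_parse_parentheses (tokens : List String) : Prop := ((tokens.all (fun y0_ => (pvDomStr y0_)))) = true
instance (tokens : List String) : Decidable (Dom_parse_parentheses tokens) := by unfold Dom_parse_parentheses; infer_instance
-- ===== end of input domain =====

-- B replaces A's recursive descent (which rescans ahead for each matching ')' and recurses
-- on slices) by a single left-to-right pass keeping a stack of saved (base, sign) pairs.

-- ===== PORT A =====

-- the inner `while j < len(tokens) and depth > 0` scan; returns (j, depth)
def pvScanA (tokens : List String) (depth : Nat) (j : Nat) : Nat × Nat :=
  if h : j < tokens.length ∧ 0 < depth then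
    let t := tokens[j]'h.1
    pvScanA tokens (if t = "(" then depth + 1 else if t = ")" then depth - 1 else depth) (j + 1)
  else (j, depth)
termination_by tokens.length - j
decreasing_by exact Nat.sub_succ_lt_self tokens.length j h.1

-- the `while i < len(tokens)` loop of parse_parentheses, with the recursive call
-- parse_parentheses(sub_tokens) inlined as a call on the slice; `fuel` is only a
-- structural totality guard (one unit per loop step / recursive descent), always
-- called with enough fuel to never run out
def pvLoopA (tokens : List String) (pos neg : List String) (sign : String) (i : Nat)
    (fuel : Nat) : List String × List String :=
  match fuel with
  | 0 => (pos, neg)  -- never reached: callers supply fuel > number of remaining steps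
  | fuel + 1 =>
    if h : i < tokens.length then
      let token := tokens[i]'h
      if token = "+" then pvLoopA tokens pos neg "+" (i + 1) fuel
      else if token = "-" then pvLoopA tokens pos neg "-" (i + 1) fuel
      else if token = "(" then
        let jd := pvScanA tokens 1 (i + 1)
        if jd.2 ≠ 0 then ([], [])  -- raise ValueError("Mismatched parentheses"); outside Pre_
        else
          let sub := PySem.List.slice tokens (some ((i : Int) + 1)) (some ((jd.1 : Int) - 1))
          let r := pvLoopA sub [] [] "+" 0 fuel
          if sign = "+" then pvLoopA tokens (pos ++ r.1) (neg ++ r.2) sign jd.1 fuel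
          else pvLoopA tokens (pos ++ r.2) (neg ++ r.1) sign jd.1 fuel
      else if token = ")" then ([], [])  -- raise ValueError("Unexpected closing parenthesis"); outside Pre_
      else if sign = "+" then pvLoopA tokens (pos ++ [PySem.Str.lower token]) neg sign (i + 1) fuel
      else pvLoopA tokens pos (neg ++ [PySem.Str.lower token]) sign (i + 1) fuel
    else (pos, neg)

def parse_parentheses (tokens : List String) : List String × List String :=
  pvLoopA tokens [] [] "+" 0 (tokens.length + 1)

-- ===== PORT B =====

-- state: ((positive, negative), sign, base, stack); Python's list used as a stack
-- (append/pop at the same end) is modelled with the top at the head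
def pvStepB (s : (List String × List String) × String × String × List (String × String))
    (token : String) : (List String × List String) × String × String × List (String × String) :=
  match s with
  | ((pos, neg), sign, base, stack) =>
    if token = "+" then ((pos, neg), "+", base, stack)
    else if token = "-" then ((pos, neg), "-", base, stack)
    else if token = "(" then ((pos, neg), "+", (if base = sign then "+" else "-"), (base, sign) :: stack)
    else if token = ")" then
      match stack with
      | [] => (([], []), sign, base, [])  -- raise ValueError("Unexpected closing parenthesis"); outside Pre_
      | (b, sg) :: rest => ((pos, neg), sg, b, rest)
    else if base = sign then ((pos ++ [PySem.Str.lower token], neg), sign, base, stack)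
    else ((pos, neg ++ [PySem.Str.lower token]), sign, base, stack)

def parse_parentheses_alt (tokens : List String) : List String × List String :=
  match tokens.foldl pvStepB (([], []), "+", "+", []) with
  | ((pos, neg), _, _, stack) =>
    if stack.isEmpty then (pos, neg) else ([], [])  -- raise ValueError("Mismatched parentheses"); outside Pre_

-- ===== PRECONDITION & SPEC =====
-- Pre_ excludes exactly the inputs with unbalanced parentheses, on which A raises ValueError.
def Pre_parse_parentheses (tokens : List String) : Prop :=
  (∀ n < tokens.length + 1, (tokens.take n).count ")" ≤ (tokens.take n).count "(") ∧
    tokens.count "(" = tokens.count ")"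
instance (tokens : List String) : Decidable (Pre_parse_parentheses tokens) := by
  unfold Pre_parse_parentheses; infer_instance

def pvWitness_parse_parentheses : List String := ["-", "(", "Apple", "+", "B", ")", "c"]

def Spec_parse_parentheses (tokens : List String) (out : List String × List String) : Prop :=
  out = parse_parentheses_alt tokens
instance (tokens : List String) (out : List String × List String) :
    Decidable (Spec_parse_parentheses tokens out) := by unfold Spec_parse_parentheses; infer_instance

-- ===== CLAIM (what is proved, stated in full; the proofs are below) =====
def Claim_equal_parse_parentheses : Prop := ∀ (tokens : List String), Dom_parse_parentheses tokens → Pre_parse_parentheses tokens → Spec_parse_parentheses tokens (parse_parentheses tokens)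

-- ===== LEMMAS AND PROOFS =====

-- token depth contribution and prefix depths
def pvDelta (t : String) : Int := if t = "(" then 1 else if t = ")" then -1 else 0
def pvDepth (ts : List String) : Int := (ts.map pvDelta).sum
def pvBal (ts : List String) : Prop := (∀ n, 0 ≤ pvDepth (ts.take n)) ∧ pvDepth ts = 0

-- list-level version of pvScanA
def pvScanL (d : Nat) (ts : List String) : Nat × Nat :=
  match ts with
  | [] => (0, d)
  | t :: tl =>
    if d = 0 then (0, d)
    else
      let r := pvScanL (if t = "(" then d + 1 else if t = ")" then d - 1 else d) tl
      (r.1 + 1, r.2)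

-- list-level version of pvLoopA
def pvListA (ts : List String) (pos neg : List String) (sign : String) :
    List String × List String :=
  match ts with
  | [] => (pos, neg)
  | t :: tl =>
    if t = "+" then pvListA tl pos neg "+"
    else if t = "-" then pvListA tl pos neg "-"
    else if t = "(" then
      let r := pvScanL 1 tl
      if r.2 ≠ 0 then ([], [])
      else
        let sub := tl.take (r.1 - 1)
        let s := pvListA sub [] [] "+"
        if sign = "+" then pvListA (tl.drop r.1) (pos ++ s.1) (neg ++ s.2) sign
        else pvListA (tl.drop r.1) (pos ++ s.2) (neg ++ s.1) sign
    else if t = ")" then ([], [])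
    else if sign = "+" then pvListA tl (pos ++ [PySem.Str.lower t]) neg sign
    else pvListA tl pos (neg ++ [PySem.Str.lower t]) sign
termination_by ts.length
decreasing_by
  all_goals simp_all [List.length_take, List.length_drop]

def pvApp (base : String) (pn s : List String × List String) : List String × List String :=
  if base = "+" then (pn.1 ++ s.1, pn.2 ++ s.2) else (pn.1 ++ s.2, pn.2 ++ s.1)

theorem pvDepth_nil : pvDepth [] = 0 := by simp [pvDepth]
theorem pvDepth_cons (t : String) (tl : List String) :
    pvDepth (t :: tl) = pvDelta t + pvDepth tl := by simp [pvDepth]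
theorem pvDepth_append (a b : List String) : pvDepth (a ++ b) = pvDepth a + pvDepth b := by
  simp [pvDepth]

theorem pvDepth_count (l : List String) :
    pvDepth l = (l.count "(" : Int) - (l.count ")" : Int) := by
  induction l with
  | nil => simp [pvDepth]
  | cons t tl ih =>
    rw [pvDepth_cons, ih]
    by_cases h1 : t = "("
    · subst h1; simp [pvDelta]; omega
    · by_cases h2 : t = ")"
      · subst h2; simp [pvDelta]; omega
      · simp [pvDelta, h1, h2]
      

theorem pre_bal (tokens : List String) (h : Pre_parse_parentheses tokens) : pvBal tokens := by
  obtain ⟨h1, h2⟩ := h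
  constructor
  · intro n
    by_cases hn : n < tokens.length + 1
    · have := h1 n hn
      rw [pvDepth_count]
      omega
    · rw [List.take_of_length_le (by omega), pvDepth_count]
      omega
  · rw [pvDepth_count]; omega

theorem pvBal_cons_zero (t : String) (tl : List String) (hd : pvDelta t = 0)
    (h : pvBal (t :: tl)) : pvBal tl := by
  obtain ⟨h1, h2⟩ := h
  constructor
  · intro n
    have := h1 (n + 1)
    rw [List.take_succ_cons, pvDepth_cons, hd] at this
    omega
  · rw [pvDepth_cons, hd] at h2; omega

theorem pvBal_close (tl : List String) (h : pvBal (")" :: tl)) : False := by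
  have := h.1 1
  simp [List.take_succ_cons, pvDepth_cons, pvDelta, pvDepth_nil] at this

theorem pvBal_open (tl : List String) (h : pvBal ("(" :: tl)) :
    (∀ n, -1 ≤ pvDepth (tl.take n)) ∧ pvDepth tl = -1 := by
  obtain ⟨h1, h2⟩ := h
  rw [pvDepth_cons] at h2
  simp only [pvDelta, if_pos] at h2
  refine ⟨fun n => ?_, by omega⟩
  have := h1 (n + 1)
  rw [List.take_succ_cons, pvDepth_cons] at this
  simp only [pvDelta, if_pos] at this
  omega

-- split off the matching ')' of an initial '('
theorem pvSplit (rest : List String) (h1 : ∀ n, -1 ≤ pvDepth (rest.take n))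
    (h2 : pvDepth rest = -1) :
    ∃ inner rest2, rest = inner ++ ")" :: rest2 ∧ pvBal inner ∧ pvBal rest2 := by
  have hex : ∃ n, pvDepth (rest.take n) = -1 := ⟨rest.length, by rwa [List.take_length]⟩
  classical
  set m := Nat.find hex with hm
  have hspec : pvDepth (rest.take m) = -1 := Nat.find_spec hex
  have hmin : ∀ k, k < m → pvDepth (rest.take k) ≠ -1 := fun k hk => Nat.find_min hex hk
  have hm1 : 1 ≤ m := by
    rcases Nat.eq_zero_or_pos m with h0 | h0
    · rw [h0] at hspec; simp [pvDepth_nil] at hspec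
    · exact h0
  have hmlen : m ≤ rest.length := by
    by_contra hc
    push Not at hc
    rw [List.take_of_length_le (by omega)] at hspec
    have := hmin rest.length (by omega)
    rw [List.take_length] at this
    exact this hspec
  have hlt : m - 1 < rest.length := by omega
  have htakem : rest.take m = rest.take (m - 1) ++ [rest[m - 1]'hlt] := by
    conv_lhs => rw [show m = (m - 1) + 1 from by omega]
    rw [List.take_add_one, List.getElem?_eq_getElem hlt]
    simp
  have hd1 : pvDepth (rest.take (m - 1)) = 0 := by
    have hge := h1 (m - 1)
    have hne := hmin (m - 1) (by omega)
    rw [htakem, pvDepth_append] at hspec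
    have hdelta : pvDelta (rest[m - 1]'hlt) = 1 ∨ pvDelta (rest[m - 1]'hlt) = -1 ∨
        pvDelta (rest[m - 1]'hlt) = 0 := by
      unfold pvDelta; split_ifs <;> simp
    simp [pvDepth_cons, pvDepth_nil] at hspec
    omega
  have hclose : rest[m - 1]'hlt = ")" := by
    rw [htakem, pvDepth_append, hd1] at hspec
    simp [pvDepth_cons, pvDepth_nil] at hspec
    by_contra hc
    unfold pvDelta at hspec
    rw [if_neg hc] at hspec
    split_ifs at hspec
  refine ⟨rest.take (m - 1), rest.drop m, ?_, ⟨?_, hd1⟩, ⟨?_, ?_⟩⟩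
  · conv_lhs => rw [← List.take_append_drop (m - 1) rest]
    congr 1
    rw [List.drop_eq_getElem_cons hlt, hclose, show m - 1 + 1 = m from by omega]
  · intro n
    rcases Nat.lt_or_ge n (m - 1) with hn | hn
    · rw [List.take_take]
      have := h1 (min n (m - 1))
      have := hmin (min n (m - 1)) (by omega)
      omega
    · rw [List.take_of_length_le (by simp [List.length_take]; omega)]
      omega
  · intro n
    have := h1 (m + n)
    rw [List.take_add, pvDepth_append, hspec] at this
    omega
  · have := List.take_append_drop m rest
    have heq : pvDepth rest = pvDepth (rest.take m) + pvDepth (rest.drop m) := by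
      conv_lhs => rw [← this]
      rw [pvDepth_append]
    rw [h2, hspec] at heq
    omega

-- the scan walks straight through a segment whose running depth never hits 0
theorem pvScanL_append (inner : List String) : ∀ (d : Nat) (rest : List String),
    (∀ n, n ≤ inner.length → 0 < (d : Int) + pvDepth (inner.take n)) →
    pvScanL d (inner ++ rest) =
      ((pvScanL ((d : Int) + pvDepth inner).toNat rest).1 + inner.length,
       (pvScanL ((d : Int) + pvDepth inner).toNat rest).2) := by
  induction inner with
  | nil => intro d rest _; simp [pvDepth_nil]
  | cons t tl ih =>
    intro d rest h
    have hd0 : 0 < d := by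
      have := h 0 (by omega)
      simp [pvDepth_nil] at this
      exact_mod_cast this
    have hne : ¬ d = 0 := by omega
    rw [List.cons_append]
    show pvScanL d (t :: (tl ++ rest)) = _
    rw [pvScanL]
    simp only [hne, if_false]
    set d' : Nat := if t = "(" then d + 1 else if t = ")" then d - 1 else d with hd'
    have hcast : (d' : Int) = (d : Int) + pvDelta t := by
      by_cases h1 : t = "("
      · simp [hd', h1, pvDelta]
      · by_cases h2 : t = ")"
        · simp [hd', h2, pvDelta]; omega
        · simp [hd', h1, h2, pvDelta]
    have hih := ih d' rest (by
      intro n hn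
      have := h (n + 1) (by simpa using hn)
      rw [List.take_succ_cons, pvDepth_cons] at this
      omega)
    rw [hih]
    have : ((d' : Int) + pvDepth tl).toNat = ((d : Int) + pvDepth (t :: tl)).toNat := by
      rw [pvDepth_cons]; omega
    rw [this]
    simp
    omega

theorem pvScanL_zero (ts : List String) : pvScanL 0 ts = (0, 0) := by
  cases ts <;> simp [pvScanL]

theorem pvScanL_close (inner rest : List String) (h : pvBal inner) :
    pvScanL 1 (inner ++ ")" :: rest) = (inner.length + 1, 0) := by
  rw [pvScanL_append inner 1 (")" :: rest) (by
    intro n _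
    have := h.1 n
    omega)]
  rw [h.2]
  simp [pvScanL, pvScanL_zero]
  omega

-- the scan never moves j backwards
theorem pvScanA_ge (tokens : List String) (d j : Nat) : j ≤ (pvScanA tokens d j).1 := by
  unfold pvScanA
  split
  · have := pvScanA_ge tokens (if tokens[j]'(by omega) = "(" then d + 1 else if tokens[j]'(by omega) = ")" then d - 1 else d) (j + 1)
    simp only []
    omega
  · simp
termination_by tokens.length - j
decreasing_by omega

-- index-level scan = list-level scan on the dropped suffix
theorem pvScanA_eq (tokens : List String) : ∀ (d j : Nat),
    pvScanA tokens d j = ((pvScanL d (tokens.drop j)).1 + j, (pvScanL d (tokens.drop j)).2) := by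
  intro d j
  rw [pvScanA]
  by_cases h : j < tokens.length ∧ 0 < d
  · rw [dif_pos h]
    have hdrop : tokens.drop j = tokens[j]'h.1 :: tokens.drop (j + 1) :=
      List.drop_eq_getElem_cons h.1
    rw [hdrop, pvScanL]
    have hne : ¬ d = 0 := by omega
    simp only [hne, if_false]
    rw [pvScanA_eq tokens _ (j + 1)]
    simp
    omega
  · rw [dif_neg h]
    rcases Nat.lt_or_ge j tokens.length with hj | hj
    · have hd : d = 0 := by omega
      subst hd
      rw [pvScanL_zero]
      simp
    · rw [List.drop_of_length_le hj]
      simp [pvScanL]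
termination_by _ j => tokens.length - j
decreasing_by omega

-- index-level loop = list-level loop on the dropped suffix
theorem pvLoopA_eq (fuel : Nat) : ∀ (tokens pos neg : List String) (sign : String) (i : Nat),
    tokens.length + 1 - i ≤ fuel →
    pvLoopA tokens pos neg sign i fuel = pvListA (tokens.drop i) pos neg sign := by
  induction fuel with
  | zero =>
    intro tokens pos neg sign i hfu
    show (pos, neg) = _
    rw [List.drop_of_length_le (by omega), pvListA]
  | succ fuel ih =>
    intro tokens pos neg sign i hfu
    show (if h : i < tokens.length then _ else (pos, neg)) = _
    by_cases h : i < tokens.length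
    · rw [dif_pos h]
      have hdrop : tokens.drop i = tokens[i]'h :: tokens.drop (i + 1) := List.drop_eq_getElem_cons h
      rw [hdrop, pvListA]
      by_cases h1 : tokens[i]'h = "+"
      · simp only [if_pos h1]
        exact ih tokens pos neg "+" (i + 1) (by omega)
      · simp only [if_neg h1]
        by_cases h2 : tokens[i]'h = "-"
        · simp only [if_pos h2]
          exact ih tokens pos neg "-" (i + 1) (by omega)
        · simp only [if_neg h2]
          by_cases h3 : tokens[i]'h = "("
          · simp only [if_pos h3, pvScanA_eq tokens 1 (i + 1)]
            by_cases hf : (pvScanL 1 (tokens.drop (i + 1))).2 ≠ 0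
            · simp only [if_pos hf]
            · simp only [if_neg hf]
              have hslice : PySem.List.slice tokens (some ((i : Int) + 1))
                  (some ((((pvScanL 1 (tokens.drop (i + 1))).1 + (i + 1) : Nat) : Int) - 1)) =
                  (tokens.drop (i + 1)).take ((pvScanL 1 (tokens.drop (i + 1))).1 - 1) := by
                rw [show ((((pvScanL 1 (tokens.drop (i + 1))).1 + (i + 1) : Nat) : Int) - 1) =
                      (((pvScanL 1 (tokens.drop (i + 1))).1 + i : Nat) : Int) by push_cast; ring,
                    show ((i : Int) + 1) = ((i + 1 : Nat) : Int) by push_cast; ring,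
                    PySem.List.slice_natCast]
                congr 1
                omega
              rw [hslice]
              have hsub := ih ((tokens.drop (i + 1)).take ((pvScanL 1 (tokens.drop (i + 1))).1 - 1)) [] [] "+" 0
                (by simp only [List.length_take, List.length_drop]; omega)
              rw [List.drop_zero] at hsub
              rw [hsub]
              have hdd : (tokens.drop (i + 1)).drop (pvScanL 1 (tokens.drop (i + 1))).1 =
                  tokens.drop ((pvScanL 1 (tokens.drop (i + 1))).1 + (i + 1)) := by
                rw [List.drop_drop]
                congr 1
                omega
              by_cases hs : sign = "+"
              · simp only [hs, if_pos, hdd]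
                exact ih tokens _ _ "+" _ (by
                  have := pvScanA_ge tokens 1 (i + 1)
                  rw [pvScanA_eq tokens 1 (i + 1)] at this
                  omega)
              · rw [if_neg hs, if_neg hs, hdd]
                exact ih tokens _ _ sign _ (by
                  have := pvScanA_ge tokens 1 (i + 1)
                  rw [pvScanA_eq tokens 1 (i + 1)] at this
                  omega)
          · simp only [if_neg h3]
            by_cases h4 : tokens[i]'h = ")"
            · simp only [if_pos h4]
            · simp only [if_neg h4]
              by_cases hs : sign = "+"
              · simp only [hs, if_pos]
                exact ih tokens _ _ "+" (i + 1) (by omega)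
              · rw [if_neg hs, if_neg hs]
                exact ih tokens _ _ sign (i + 1) (by omega)
    · rw [dif_neg h]
      rw [List.drop_of_length_le (by omega), pvListA]

-- main invariant: over a balanced segment, B's fold appends exactly A's two lists
-- (swapped when the effective enclosing sign is '-'), restores base and stack
theorem pvMain (N : Nat) : ∀ ts : List String, ts.length ≤ N → pvBal ts →
    ∀ sign : String, (sign = "+" ∨ sign = "-") → ∀ p n : List String,
    (pvListA ts p n sign = (p ++ (pvListA ts [] [] sign).1, n ++ (pvListA ts [] [] sign).2)) ∧
    (∀ (base : String) stack, (base = "+" ∨ base = "-") →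
      ∃ sign', List.foldl pvStepB ((p, n), sign, base, stack) ts =
        (pvApp base (p, n) (pvListA ts [] [] sign), sign', base, stack)) := by
  induction N with
  | zero =>
    intro ts hlen hbal sign hs p n
    have hnil : ts = [] := List.eq_nil_of_length_eq_zero (by omega)
    subst hnil
    refine ⟨by simp [pvListA], fun base stack hb => ⟨sign, by
      simp only [List.foldl_nil, pvListA, pvApp]
      split_ifs <;> simp⟩⟩
  | succ N ih =>
    intro ts hlen hbal sign hs p n
    match ts with
    | [] =>
      refine ⟨by simp [pvListA], fun base stack hb => ⟨sign, by
        simp only [List.foldl_nil, pvListA, pvApp]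
        split_ifs <;> simp⟩⟩
    | t :: tl =>
      simp only [List.length_cons] at hlen
      by_cases h1 : t = "+"
      · subst h1
        have hbtl : pvBal tl := pvBal_cons_zero _ tl (by simp [pvDelta]) hbal
        have ihtl := ih tl (by omega) hbtl "+" (Or.inl rfl)
        constructor
        · simp only [pvListA, String.reduceEq, reduceIte]
          exact (ihtl p n).1
        · intro base stack hb
          obtain ⟨s', hf⟩ := (ihtl p n).2 base stack hb
          exact ⟨s', by simp only [List.foldl_cons, pvStepB, String.reduceEq, reduceIte, pvListA, hf]⟩
      · by_cases h2 : t = "-"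
        · subst h2
          have hbtl : pvBal tl := pvBal_cons_zero _ tl (by simp [pvDelta]) hbal
          have ihtl := ih tl (by omega) hbtl "-" (Or.inr rfl)
          constructor
          · simp only [pvListA, String.reduceEq, reduceIte]
            exact (ihtl p n).1
          · intro base stack hb
            obtain ⟨s', hf⟩ := (ihtl p n).2 base stack hb
            exact ⟨s', by simp only [List.foldl_cons, pvStepB, String.reduceEq, reduceIte, pvListA, hf]⟩
        · by_cases h3 : t = "("
          · subst h3
            obtain ⟨hpre, hdep⟩ := pvBal_open tl hbal
            obtain ⟨inner, rest2, heq, hbi, hbr⟩ := pvSplit tl hpre hdep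
            subst heq
            have hllen : (inner ++ ")" :: rest2).length = inner.length + (rest2.length + 1) := by
              simp
            have hli : inner.length ≤ N := by omega
            have hlr : rest2.length ≤ N := by omega
            have hscan := pvScanL_close inner rest2 hbi
            have hdrop : (inner ++ ")" :: rest2).drop (inner.length + 1) = rest2 := by
              rw [show inner ++ ")" :: rest2 = (inner ++ [")"]) ++ rest2 by simp]
              exact List.drop_left' (by simp)
            have htake : (inner ++ ")" :: rest2).take (inner.length + 1 - 1) = inner := by
              simp
            have hstep : ∀ p n : List String,
                pvListA ("(" :: (inner ++ ")" :: rest2)) p n sign =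
                  (if sign = "+" then
                    pvListA rest2 (p ++ (pvListA inner [] [] "+").1) (n ++ (pvListA inner [] [] "+").2) sign
                  else
                    pvListA rest2 (p ++ (pvListA inner [] [] "+").2) (n ++ (pvListA inner [] [] "+").1) sign) := by
              intro p n
              rw [pvListA]
              simp only [String.reduceEq, reduceIte, hscan, htake, hdrop, ne_eq]
              simp
            have ihinner := ih inner hli hbi "+" (Or.inl rfl)
            have ihrest := ih rest2 hlr hbr sign hs
            constructor
            · rw [hstep p n, hstep [] []]
              rcases hs with hs2 | hs2 <;> subst hs2
              · simp only [List.nil_append]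
                rw [(ihrest (p ++ (pvListA inner [] [] "+").1) (n ++ (pvListA inner [] [] "+").2)).1,
                    (ihrest (pvListA inner [] [] "+").1 (pvListA inner [] [] "+").2).1]
                simp [List.append_assoc]
              · simp only [List.nil_append]
                rw [(ihrest (p ++ (pvListA inner [] [] "+").2) (n ++ (pvListA inner [] [] "+").1)).1,
                    (ihrest (pvListA inner [] [] "+").2 (pvListA inner [] [] "+").1).1]
                simp [List.append_assoc]
            · intro base stack hb
              have hb' : (if base = sign then "+" else "-") = "+" ∨ (if base = sign then "+" else "-") = "-" := by
                split_ifs <;> simp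
              obtain ⟨s1', hfold1⟩ := (ihinner p n).2 (if base = sign then "+" else "-") ((base, sign) :: stack) hb'
              rcases hq : pvApp (if base = sign then "+" else "-") (p, n) (pvListA inner [] [] "+") with ⟨q1, q2⟩
              obtain ⟨s2', hfold2⟩ := (ihrest q1 q2).2 base stack hb
              refine ⟨s2', ?_⟩
              rw [List.foldl_cons]
              have hstep1 : pvStepB ((p, n), sign, base, stack) "(" =
                  ((p, n), "+", (if base = sign then "+" else "-"), (base, sign) :: stack) := by
                simp [pvStepB]
              rw [hstep1, List.foldl_append, hfold1, hq, List.foldl_cons]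
              have hstep2 : pvStepB ((q1, q2), s1', (if base = sign then "+" else "-"), (base, sign) :: stack) ")" =
                  ((q1, q2), sign, base, stack) := by
                simp [pvStepB]
              rw [hstep2, hfold2, hstep [] []]
              rcases hs with hs2 | hs2 <;> rcases hb with hb2 | hb2 <;> subst hs2 <;> subst hb2 <;>
                simp only [String.reduceEq, reduceIte, List.nil_append, pvApp] at hq ⊢ <;>
                (first
                  | rw [(ihrest (pvListA inner [] [] "+").1 (pvListA inner [] [] "+").2).1]
                  | rw [(ihrest (pvListA inner [] [] "+").2 (pvListA inner [] [] "+").1).1])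
              all_goals
                obtain ⟨hq1, hq2⟩ := Prod.mk.injEq .. ▸ hq
                subst hq1
                subst hq2
                simp [List.append_assoc]
          · by_cases h4 : t = ")"
            · subst h4
              exact absurd hbal (fun hh => pvBal_close tl hh)
            · have hbtl : pvBal tl := pvBal_cons_zero _ tl (by simp [pvDelta, h3, h4]) hbal
              have ihtl := ih tl (by omega) hbtl sign hs
              have hstep : ∀ p n : List String,
                  pvListA (t :: tl) p n sign =
                    (if sign = "+" then pvListA tl (p ++ [PySem.Str.lower t]) n sign
                     else pvListA tl p (n ++ [PySem.Str.lower t]) sign) := by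
                intro p n
                rw [pvListA]
                simp only [h1, h2, h3, h4, if_false]
              constructor
              · rw [hstep p n, hstep [] []]
                rcases hs with hs2 | hs2 <;> subst hs2
                · simp only [List.nil_append]
                  rw [(ihtl (p ++ [PySem.Str.lower t]) n).1, (ihtl [PySem.Str.lower t] []).1]
                  simp [List.append_assoc]
                · simp only [List.nil_append]
                  rw [(ihtl p (n ++ [PySem.Str.lower t])).1, (ihtl [] [PySem.Str.lower t]).1]
                  simp [List.append_assoc]
              · intro base stack hb
                rw [List.foldl_cons, hstep [] []]
                rcases hs with hs2 | hs2 <;> rcases hb with hb2 | hb2 <;> subst hs2 <;> subst hb2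
                all_goals simp only [pvStepB, h1, h2, h3, h4, if_false, String.reduceEq, reduceIte, List.nil_append]
                · obtain ⟨s', hf⟩ := (ihtl (p ++ [PySem.Str.lower t]) n).2 "+" stack (Or.inl rfl)
                  refine ⟨s', ?_⟩
                  rw [hf, (ihtl [PySem.Str.lower t] []).1]
                  simp [pvApp, List.append_assoc]
                · obtain ⟨s', hf⟩ := (ihtl p (n ++ [PySem.Str.lower t])).2 "-" stack (Or.inr rfl)
                  refine ⟨s', ?_⟩
                  rw [hf, (ihtl [PySem.Str.lower t] []).1]
                  simp [pvApp, List.append_assoc]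
                · obtain ⟨s', hf⟩ := (ihtl p (n ++ [PySem.Str.lower t])).2 "+" stack (Or.inl rfl)
                  refine ⟨s', ?_⟩
                  rw [hf, (ihtl [] [PySem.Str.lower t]).1]
                  simp [pvApp, List.append_assoc]
                · obtain ⟨s', hf⟩ := (ihtl (p ++ [PySem.Str.lower t]) n).2 "-" stack (Or.inr rfl)
                  refine ⟨s', ?_⟩
                  rw [hf, (ihtl [] [PySem.Str.lower t]).1]
                  simp [pvApp, List.append_assoc]

-- ===== VERDICT (by name: the statement is the Claim_ definition above) =====
theorem parse_parentheses_spec : Claim_equal_parse_parentheses := by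
  intro tokens _hdom hpre
  unfold Spec_parse_parentheses
  have hbal := pre_bal tokens hpre
  have hA : parse_parentheses tokens = pvListA tokens [] [] "+" := by
    unfold parse_parentheses
    simpa using pvLoopA_eq (tokens.length + 1) tokens [] [] "+" 0 (by omega)
  obtain ⟨s', hB⟩ := ((pvMain tokens.length tokens le_rfl hbal "+" (Or.inl rfl) [] []).2) "+" [] (Or.inl rfl)
  unfold parse_parentheses_alt
  rw [hB, hA]
  simp [pvApp]
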